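-- pv_equiv track=rewrite | github.com/jaytlang/networkedlasers | app/trajectory_planner.py | find_next_point
-- ===== SOURCE A (Python) =====
-- def find_next_point(points, x, y):
--     # Given some point in the contour, find the next (adjacent) point in the contour
--
--     # try using four_level adjacency first, and if nothing is found, use eight_level adjacency
--     for point in points:
--         if is_adjacent(x, y, point[0], point[1], adjacency='four_level'):
--             return point
--
--
--     for point in points:
--         if is_adjacent(x, y, point[0], point[1], adjacency='eight_level'):
--             return point
--
--     return None
--
-- def is_adjacent(x1, y1, x2, y2, adjacency='eight_level'):
--     if(x1 == x2 and y1 ==y2):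
--         return False
--
--     if(adjacency == 'four_level'):
--         if (x1 == x2 and abs(y1-y2) == 1):
--             return True
--         if (y1 == y2 and abs(x1-x2) == 1):
--             return True
--         return False
--
--     if(adjacency == 'eight_level'):
--         if(abs(x1-x2) <= 1 and abs(y1-y2) <= 1):
--             return True
--         return False
-- ===== SOURCE B (Python) =====
-- def find_next_point(points, x, y):
--     # One pass: return immediately on a four-level neighbour; remember the
--     # first eight-level neighbour as a fallback for after the loop.
--     fallback = None
--     for point in points:
--         dx = abs(x - point[0])
--         dy = abs(y - point[1])
--         if dx + dy == 1:
--             return point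
--         if fallback is None and (dx or dy) and dx <= 1 and dy <= 1:
--             fallback = point
--     return fallback
-- ===== Notes on version B (the rewrite author's own statement) =====
-- stated objective: simpler
-- what changed: Replaces A's two sequential scans (four-level, then eight-level) by a single pass that returns a four-level neighbour immediately and keeps the first eight-level neighbour in a fallback variable, with adjacency expressed arithmetically (dx+dy==1 / dx,dy<=1).
-- outside the precondition, e.g. on find_next_point([[0, 1], [5]], 0, 0): A returns [0, 1], B returns [0, 1]
import Mathlib
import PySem

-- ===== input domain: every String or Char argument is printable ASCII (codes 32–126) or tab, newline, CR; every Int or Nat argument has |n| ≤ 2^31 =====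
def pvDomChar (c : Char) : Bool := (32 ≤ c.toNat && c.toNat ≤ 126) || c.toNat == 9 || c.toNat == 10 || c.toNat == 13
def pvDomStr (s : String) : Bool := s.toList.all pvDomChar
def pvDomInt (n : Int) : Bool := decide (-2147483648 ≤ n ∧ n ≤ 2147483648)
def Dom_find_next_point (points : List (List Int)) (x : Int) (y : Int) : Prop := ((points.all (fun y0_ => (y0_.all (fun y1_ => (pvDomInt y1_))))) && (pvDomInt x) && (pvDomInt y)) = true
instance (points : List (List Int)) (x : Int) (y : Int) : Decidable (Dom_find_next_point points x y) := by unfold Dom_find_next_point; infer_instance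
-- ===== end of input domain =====

-- B replaces A's two sequential scans by one pass with a fallback variable (objective: simpler).

-- ===== PORT A =====
-- point[i] under Pre_ (every point has ≥ 2 coordinates) is exact via pyGet? with a default
def pvPt (p : List Int) (i : Int) : Int := (PySem.List.pyGet? p i).getD 0

def is_adjacent (x1 : Int) (y1 : Int) (x2 : Int) (y2 : Int) (adjacency : String) : Bool :=
  if x1 == x2 && y1 == y2 then false
  else if adjacency == "four_level" then
    if x1 == x2 && (y1 - y2).natAbs == 1 then true
    else if y1 == y2 && (x1 - x2).natAbs == 1 then true
    else false
  else if adjacency == "eight_level" then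
    if (x1 - x2).natAbs ≤ 1 && (y1 - y2).natAbs ≤ 1 then true
    else false
  else false

def fnpLoopFour (points : List (List Int)) (x : Int) (y : Int) : Option (List Int) :=
  match points with
  | [] => none
  | p :: rest =>
    if is_adjacent x y (pvPt p 0) (pvPt p 1) "four_level" then some p
    else fnpLoopFour rest x y

def fnpLoopEight (points : List (List Int)) (x : Int) (y : Int) : Option (List Int) :=
  match points with
  | [] => none
  | p :: rest =>
    if is_adjacent x y (pvPt p 0) (pvPt p 1) "eight_level" then some p
    else fnpLoopEight rest x y

def find_next_point (points : List (List Int)) (x : Int) (y : Int) : Option (List Int) :=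
  match fnpLoopFour points x y with
  | some p => some p
  | none => fnpLoopEight points x y

-- ===== PORT B =====
def fnpAltLoop (points : List (List Int)) (x : Int) (y : Int) (fallback : Option (List Int)) : Option (List Int) :=
  match points with
  | [] => fallback
  | p :: rest =>
    let dx := (x - pvPt p 0).natAbs
    let dy := (y - pvPt p 1).natAbs
    if dx + dy == 1 then some p
    else if fallback.isNone && (dx ≠ 0 || dy ≠ 0) && dx ≤ 1 && dy ≤ 1 then
      fnpAltLoop rest x y (some p)
    else fnpAltLoop rest x y fallback

def find_next_point_alt (points : List (List Int)) (x : Int) (y : Int) : Option (List Int) :=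
  fnpAltLoop points x y none

-- ===== PRECONDITION & SPEC =====
-- Pre_ excludes lists containing a point with fewer than 2 coordinates: A raises
-- IndexError on point[0]/point[1] whenever such a point is reached (B does too).
def Pre_find_next_point (points : List (List Int)) (x : Int) (y : Int) : Prop :=
  ∀ p ∈ points, 2 ≤ p.length
instance (points : List (List Int)) (x : Int) (y : Int) : Decidable (Pre_find_next_point points x y) := by unfold Pre_find_next_point; infer_instance

def pvWitness_find_next_point : List (List Int) × Int × Int := ([[0, 0], [1, 1], [0, 1]], 0, 0)

def Spec_find_next_point (points : List (List Int)) (x : Int) (y : Int) (out : Option (List Int)) : Prop := out = find_next_point_alt points x y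
instance (points : List (List Int)) (x : Int) (y : Int) (out : Option (List Int)) : Decidable (Spec_find_next_point points x y out) := by unfold Spec_find_next_point; infer_instance

-- ===== CLAIM (what is proved, stated in full; the proofs are below) =====
def Claim_equal_find_next_point : Prop := ∀ (points : List (List Int)) (x : Int) (y : Int), Dom_find_next_point points x y → Pre_find_next_point points x y → Spec_find_next_point points x y (find_next_point points x y)

-- ===== LEMMAS AND PROOFS =====

-- A's four-level adjacency test equals B's arithmetic test dx + dy == 1
theorem four_level_eq (x y a b : Int) :
    is_adjacent x y a b "four_level" = ((x - a).natAbs + (y - b).natAbs == 1) := by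
  rw [Bool.eq_iff_iff]
  simp only [is_adjacent]
  by_cases hx : x = a <;> by_cases hy : y = b <;> simp [hx, hy] <;> omega

-- A's eight-level adjacency test equals B's arithmetic fallback test
theorem eight_level_eq (x y a b : Int) :
    is_adjacent x y a b "eight_level" =
      ((decide ((x - a).natAbs ≠ 0) || decide ((y - b).natAbs ≠ 0)) &&
        decide ((x - a).natAbs ≤ 1) && decide ((y - b).natAbs ≤ 1)) := by
  rw [Bool.eq_iff_iff]
  simp only [is_adjacent]
  by_cases hx : x = a <;> by_cases hy : y = b <;> simp [hx, hy] <;> omega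

-- loop invariant: the single pass with fallback fb computes
-- "first four-level match, else fb, else first eight-level match"
theorem fnpAltLoop_eq (points : List (List Int)) (x : Int) (y : Int) (fb : Option (List Int)) :
    fnpAltLoop points x y fb =
      match fnpLoopFour points x y with
      | some p => some p
      | none => match fb with
                | some q => some q
                | none => fnpLoopEight points x y := by
  induction points generalizing fb with
  | nil => cases fb <;> simp [fnpAltLoop, fnpLoopFour, fnpLoopEight]
  | cons p rest ih =>
    simp only [fnpAltLoop, fnpLoopFour, fnpLoopEight, four_level_eq, eight_level_eq]
    by_cases h1 : ((x - pvPt p 0).natAbs + (y - pvPt p 1).natAbs == 1) = true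
    · simp [h1]
    · simp only [Bool.not_eq_true] at h1
      cases fb with
      | some q => simp [h1, ih]
      | none =>
        simp only [Option.isNone_none, Bool.true_and, h1, Bool.false_eq_true, if_false, ih]
        split_ifs <;> rfl

-- ===== VERDICT (by name: the statement is the Claim_ definition above) =====
theorem find_next_point_spec : Claim_equal_find_next_point := by
  intro points x y _ _
  unfold Spec_find_next_point find_next_point find_next_point_alt
  rw [fnpAltLoop_eq]
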